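-- pv_equiv track=rewrite | github.com/Rick2003aA/Call_me_maybe | src/decoder.py | _valid_number_prefix
-- ===== SOURCE A (Python) =====
-- def _valid_number_prefix(text: str) -> bool:
--     """Return whether text can still become a JSON number."""
--     if not text:
--         return False
--     if any(character not in "-.0123456789" for character in text):
--         return False
--     if text.count("-") > 1 or ("-" in text and not text.startswith("-")):
--         return False
--     if text.count(".") > 1:
--         return False
--
--     body = text[1:] if text.startswith("-") else text
--     if body in {"", "."}:
--         return body == ""
--     if len(body) > 1 and body[0] == "0" and body[1] != ".":
--         return False
--     return any(character.isdigit() for character in body)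
-- ===== SOURCE B (Python) =====
-- def _valid_number_prefix(text: str) -> bool:
--     """Return whether text can still become a JSON number (single-pass DFA)."""
--     S, M, Z, I, D, F = range(6)   # start, after '-', "0" int part, nonzero int part, lone '.', fraction part
--     state = S
--     for ch in text:
--         if state == S:
--             if ch == '-':
--                 state = M
--             elif ch == '0':
--                 state = Z
--             elif ch.isdigit():
--                 state = I
--             elif ch == '.':
--                 state = D
--             else:
--                 return False
--         elif state == M:
--             if ch == '0':
--                 state = Z
--             elif ch.isdigit():
--                 state = I
--             elif ch == '.':
--                 state = D
--             else:
--                 return False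
--         elif state == Z:
--             if ch == '.':
--                 state = F
--             else:
--                 return False
--         elif state == I:
--             if ch.isdigit():
--                 state = I
--             elif ch == '.':
--                 state = F
--             else:
--                 return False
--         else:  # D or F
--             if ch.isdigit():
--                 state = F
--             else:
--                 return False
--     return state in (M, Z, I, F)
-- ===== Notes on version B (the rewrite author's own statement) =====
-- stated objective: alternative
-- what changed: A's sequence of whole-string scans (a membership scan, two count scans, a substring-containment scan, startswith, slicing off the sign, then body rules) is replaced by a single left-to-right pass of a six-state DFA (start, after-minus, zero-int, nonzero-int, lone-dot, fraction) that rejects early and accepts on the final state.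
import Mathlib
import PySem

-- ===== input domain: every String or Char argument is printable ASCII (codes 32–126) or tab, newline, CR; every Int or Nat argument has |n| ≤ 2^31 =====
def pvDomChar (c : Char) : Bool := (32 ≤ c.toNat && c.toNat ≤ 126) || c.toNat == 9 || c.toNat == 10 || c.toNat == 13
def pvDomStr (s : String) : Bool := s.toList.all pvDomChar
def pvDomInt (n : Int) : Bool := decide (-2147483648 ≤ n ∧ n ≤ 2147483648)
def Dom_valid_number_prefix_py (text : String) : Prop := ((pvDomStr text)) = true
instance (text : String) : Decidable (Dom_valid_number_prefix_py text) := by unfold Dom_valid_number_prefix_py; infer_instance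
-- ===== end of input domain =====

-- B replaces A's sequence of whole-string scans (any/count/in/startswith plus body rules)
-- by a single-pass six-state DFA over the characters; objective: alternative decomposition, one pass.


-- ===== PORT A =====
def jsonNumChars : List Char := "-.0123456789".toList

-- literal transliteration of A on the code-point list
def validNumA (cs : List Char) : Bool :=
  if cs = [] then false
  else if cs.any (fun c => !(jsonNumChars.contains c)) then false
  else if (1 < PySem.Chars.count cs ['-']) ||
          (PySem.Chars.isIn ['-'] cs && !(PySem.Chars.startswith cs ['-'])) then false
  else if 1 < PySem.Chars.count cs ['.'] then false
  else
    let body := if PySem.Chars.startswith cs ['-'] then PySem.List.slice cs (some 1) none else cs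
    if body = [] ∨ body = ['.'] then decide (body = [])
    else if (decide (1 < body.length)) && (PySem.List.pyGet? body (0 : Int) == some '0')
            && !(PySem.List.pyGet? body (1 : Int) == some '.') then false
    else body.any (fun c => PySem.Chars.isdigit c)

def valid_number_prefix_py (text : String) : Bool := validNumA text.toList

-- ===== PORT B =====
-- DFA states: start, after '-', int part "0", nonzero int part, lone '.', fraction part, dead
inductive NumSt : Type
  | S | M | Z | I | D | F | X
  deriving DecidableEq, Repr

def numStep (s : NumSt) (c : Char) : NumSt :=
  match s with
  | .S => if c = '-' then .M else if c = '0' then .Z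
          else if PySem.Chars.isdigit c then .I else if c = '.' then .D else .X
  | .M => if c = '0' then .Z
          else if PySem.Chars.isdigit c then .I else if c = '.' then .D else .X
  | .Z => if c = '.' then .F else .X
  | .I => if PySem.Chars.isdigit c then .I else if c = '.' then .F else .X
  | .D => if PySem.Chars.isdigit c then .F else .X
  | .F => if PySem.Chars.isdigit c then .F else .X
  | .X => .X

def numAccept : NumSt → Bool
  | .M | .Z | .I | .F => true
  | _ => false

def valid_number_prefix_py_alt (text : String) : Bool :=
  numAccept (text.toList.foldl numStep .S)

-- ===== PRECONDITION & SPEC =====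
def Spec_valid_number_prefix_py (text : String) (out : Bool) : Prop := out = valid_number_prefix_py_alt text
instance (text : String) (out : Bool) : Decidable (Spec_valid_number_prefix_py text out) := by unfold Spec_valid_number_prefix_py; infer_instance

-- ===== CLAIM (what is proved, stated in full; the proofs are below) =====
def Claim_equal_valid_number_prefix_py : Prop := ∀ (text : String), Dom_valid_number_prefix_py text → Spec_valid_number_prefix_py text (valid_number_prefix_py text)

-- ===== LEMMAS AND PROOFS =====

-- char-level facts
lemma char_eq_iff (c d : Char) : c = d ↔ c.toNat = d.toNat := by
  rw [Char.ext_iff, ← UInt32.toNat_inj]; rfl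

lemma toNat_minus : ('-' : Char).toNat = 45 := by decide
lemma toNat_dot : ('.' : Char).toNat = 46 := by decide
lemma toNat_d0 : ('0' : Char).toNat = 48 := by decide
lemma toNat_d1 : ('1' : Char).toNat = 49 := by decide
lemma toNat_d2 : ('2' : Char).toNat = 50 := by decide
lemma toNat_d3 : ('3' : Char).toNat = 51 := by decide
lemma toNat_d4 : ('4' : Char).toNat = 52 := by decide
lemma toNat_d5 : ('5' : Char).toNat = 53 := by decide
lemma toNat_d6 : ('6' : Char).toNat = 54 := by decide
lemma toNat_d7 : ('7' : Char).toNat = 55 := by decide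
lemma toNat_d8 : ('8' : Char).toNat = 56 := by decide
lemma toNat_d9 : ('9' : Char).toNat = 57 := by decide

lemma ne_dot_of_dig (c : Char) (h : PySem.Chars.isdigit c = true) : c ≠ '.' := by
  intro hc; subst hc; exact absurd h (by decide)

lemma dig_spec (c : Char) : PySem.Chars.isdigit c = true ↔ 48 ≤ c.toNat ∧ c.toNat ≤ 57 := by
  simp only [PySem.Chars.isdigit, Bool.and_eq_true, decide_eq_true_eq, Char.le_def,
    ← UInt32.le_iff_toNat_le]
  rfl

lemma json_expand : jsonNumChars = ['-', '.', '0', '1', '2', '3', '4', '5', '6', '7', '8', '9'] := by decide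

lemma contains_spec (c : Char) :
    jsonNumChars.contains c = true ↔ c.toNat = 45 ∨ c.toNat = 46 ∨ (48 ≤ c.toNat ∧ c.toNat ≤ 57) := by
  simp only [json_expand, List.contains_eq_mem, List.mem_cons, List.not_mem_nil, or_false, decide_eq_true_eq]
  constructor
  · rintro (rfl|rfl|rfl|rfl|rfl|rfl|rfl|rfl|rfl|rfl|rfl|rfl) <;> decide
  · intro h
    simp only [char_eq_iff, toNat_minus, toNat_dot, toNat_d0, toNat_d1, toNat_d2, toNat_d3,
      toNat_d4, toNat_d5, toNat_d6, toNat_d7, toNat_d8, toNat_d9]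
    omega

-- B-side run lemmas
lemma run_X (cs : List Char) : cs.foldl numStep .X = .X := by
  induction cs with
  | nil => rfl
  | cons c r ih => simpa [numStep] using ih

lemma run_F (cs : List Char) : numAccept (cs.foldl numStep .F) = cs.all PySem.Chars.isdigit := by
  induction cs with
  | nil => rfl
  | cons c r ih =>
    by_cases h : PySem.Chars.isdigit c = true
    · simp [numStep, h, ih]
    · simp [numStep, h, run_X, numAccept]

lemma run_D (cs : List Char) :
    numAccept (cs.foldl numStep .D) = (decide (cs ≠ []) && cs.all PySem.Chars.isdigit) := by
  cases cs with
  | nil => rfl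
  | cons c r =>
    by_cases h : PySem.Chars.isdigit c = true
    · simp [numStep, h, run_F]
    · simp [numStep, h, run_X, numAccept]

lemma run_Z (cs : List Char) :
    numAccept (cs.foldl numStep .Z) =
      (match cs with | [] => true | c :: r => (c == '.') && r.all PySem.Chars.isdigit) := by
  cases cs with
  | nil => rfl
  | cons c r =>
    by_cases h : c = '.'
    · subst h; simp [numStep, run_F]
    · simp [numStep, h, run_X, numAccept]

def intRest : List Char → Bool
  | [] => true
  | c :: r => if PySem.Chars.isdigit c then intRest r else (c == '.') && r.all PySem.Chars.isdigit

lemma run_I (cs : List Char) : numAccept (cs.foldl numStep .I) = intRest cs := by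
  induction cs with
  | nil => rfl
  | cons c r ih =>
    by_cases h : PySem.Chars.isdigit c = true
    · simp [numStep, h, ih, intRest]
    · by_cases h2 : c = '.'
      · subst h2; simp [numStep, h, run_F, intRest]
      · simp [numStep, h, h2, run_X, numAccept, intRest]

-- element-wise bridges
lemma all_dig_expand (t : List Char) :
    t.all PySem.Chars.isdigit =
      (t.all (fun c => c == '.' || PySem.Chars.isdigit c) && decide (t.count '.' = 0)) := by
  induction t with
  | nil => rfl
  | cons c r ih =>
    by_cases h : PySem.Chars.isdigit c = true
    · have hne : c ≠ '.' := ne_dot_of_dig c h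
      simp [List.count_cons, h, hne, ih, Bool.and_left_comm]
    · by_cases h2 : c = '.'
      · subst h2; simp [h]
      · simp [h, h2]

lemma intRest_expand (t : List Char) :
    intRest t = (t.all (fun c => c == '.' || PySem.Chars.isdigit c) && decide (t.count '.' ≤ 1)) := by
  induction t with
  | nil => rfl
  | cons c r ih =>
    by_cases h : PySem.Chars.isdigit c = true
    · have hne : c ≠ '.' := ne_dot_of_dig c h
      simp [intRest, h, hne, List.count_cons, ih, Bool.and_left_comm]
    · by_cases h2 : c = '.'
      · subst h2
        have hL : intRest ('.' :: r) = r.all PySem.Chars.isdigit := by simp [intRest, h]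
        have hiff : (r.count '.' + 1 ≤ 1) ↔ (r.count '.' = 0) := by omega
        rw [hL, all_dig_expand]
        simp [List.count_cons, hiff]
      · have hb : (c == '.') = false := by simp [h2]
        simp [intRest, h, hb, List.count_cons]

lemma not_contains_of (c : Char) (hm : c ≠ '-') (hd : c ≠ '.')
    (hdig : PySem.Chars.isdigit c = false) : jsonNumChars.contains c = false := by
  rw [Bool.eq_false_iff]
  intro hcon
  rw [contains_spec] at hcon
  have hm' : c.toNat ≠ 45 := fun h => hm ((char_eq_iff c '-').mpr (by rw [toNat_minus]; exact h))
  have hd' : c.toNat ≠ 46 := fun h => hd ((char_eq_iff c '.').mpr (by rw [toNat_dot]; exact h))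
  have hnd : ¬ (48 ≤ c.toNat ∧ c.toNat ≤ 57) := fun hh => by
    rw [← dig_spec] at hh; rw [hh] at hdig; exact absurd hdig (by decide)
  omega

lemma jsonOK_expand (t : List Char) :
    (t.all (fun c => jsonNumChars.contains c) && decide (t.count '-' = 0)) =
      t.all (fun c => c == '.' || PySem.Chars.isdigit c) := by
  induction t with
  | nil => rfl
  | cons c r ih =>
    by_cases hm : c = '-'
    · subst hm
      have h1 : jsonNumChars.contains '-' = true := by decide
      have h2 : PySem.Chars.isdigit '-' = false := by decide
      simp [List.count_cons, h1, h2]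
    · have hswap : (jsonNumChars.contains c) = (c == '.' || PySem.Chars.isdigit c) := by
        by_cases hd : c = '.'
        · subst hd; decide
        · have hb : (c == '.') = false := by simp [hd]
          rw [hb, Bool.false_or]
          cases hdig : PySem.Chars.isdigit c with
          | true =>
            rw [dig_spec] at hdig
            exact (contains_spec c).mpr (Or.inr (Or.inr hdig))
          | false => exact not_contains_of c hm hd hdig
      have hcnt : List.count '-' (c :: r) = List.count '-' r := by
        simp [List.count_cons, hm]
      rw [List.all_cons, List.all_cons, hcnt, hswap, ← ih, Bool.and_assoc]

-- A-side scan lemmas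
lemma count_go_singleton (c : Char) (l : List Char) (fuel acc : Nat) (h : l.length ≤ fuel) :
    PySem.Chars.count.go [c] fuel l acc = acc + l.count c := by
  induction l generalizing fuel acc with
  | nil => cases fuel <;> simp [PySem.Chars.count.go]
  | cons hd t ih =>
    cases fuel with
    | zero => simp at h
    | succ f =>
      simp only [List.length_cons, Nat.succ_le_succ_iff] at h
      by_cases he : hd = c
      · subst he
        have hp : List.isPrefixOf [hd] (hd :: t) = true := by simp [List.isPrefixOf]
        simp only [PySem.Chars.count.go, hp, if_pos, List.length_cons, List.length_nil,
          Nat.zero_add, List.drop_succ_cons, List.drop_zero]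
        rw [ih _ _ h]
        simp [List.count_cons]
        omega
      · have hp : List.isPrefixOf [c] (hd :: t) = false := by
          simp [List.isPrefixOf]; exact fun h => he h.symm
        simp only [PySem.Chars.count.go, hp]
        rw [if_neg (by simp [hp])]
        rw [ih _ _ h]
        simp [List.count_cons, he]

lemma count_singleton (cs : List Char) (c : Char) : PySem.Chars.count cs [c] = cs.count c := by
  have h0 : PySem.Chars.count cs [c] = PySem.Chars.count.go [c] cs.length cs 0 := by
    simp [PySem.Chars.count]
  rw [h0, count_go_singleton c cs cs.length 0 le_rfl, Nat.zero_add]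

lemma isIn_singleton (c : Char) (cs : List Char) : PySem.Chars.isIn [c] cs = cs.contains c := by
  by_cases h : c ∈ cs
  · obtain ⟨s, t, rfl⟩ := List.append_of_mem h
    have : [c] <:+: s ++ c :: t := ⟨s, t, by simp⟩
    rw [(PySem.Chars.isIn_iff_infix _ _).mpr this]
    simp [List.contains_eq_mem, h]
  · have : ¬ ([c] <:+: cs) := by
      intro ⟨s, t, hst⟩
      exact h (by rw [← hst]; simp)
    rw [(PySem.Chars.isIn_eq_false_iff _ _).mpr this]
    simp [List.contains_eq_mem, h]

def headBeq (cs : List Char) (c : Char) : Bool :=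
  match cs with | [] => false | d :: _ => d == c

lemma startswith_singleton (cs : List Char) (c : Char) :
    PySem.Chars.startswith cs [c] = headBeq cs c := by
  cases cs with
  | nil => rfl
  | cons d r => simp [PySem.Chars.startswith, List.isPrefixOf, headBeq, BEq.comm]

-- A's verdict on the (minus-free) body, as an if-chain
def bodyFinal (b : List Char) : Bool :=
  if b = [] ∨ b = ['.'] then decide (b = [])
  else if (decide (1 < b.length)) && (PySem.List.pyGet? b (0 : Int) == some '0')
          && !(PySem.List.pyGet? b (1 : Int) == some '.') then false
  else b.any (fun c => PySem.Chars.isdigit c)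

def bodyOK (b : List Char) : Bool :=
  if b.any (fun c => !(jsonNumChars.contains c)) then false
  else if 0 < b.count '-' then false
  else if 1 < b.count '.' then false
  else bodyFinal b

-- validNumA with the PySem scans replaced by their elementary values
def validE (cs : List Char) : Bool :=
  if cs = [] then false
  else if cs.any (fun c => !(jsonNumChars.contains c)) then false
  else if (1 < cs.count '-') || (cs.contains '-' && !(headBeq cs '-')) then false
  else if 1 < cs.count '.' then false
  else
    let body := if headBeq cs '-' then cs.tail else cs
    if body = [] ∨ body = ['.'] then decide (body = [])
    else if (decide (1 < body.length)) && (PySem.List.pyGet? body (0 : Int) == some '0')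
            && !(PySem.List.pyGet? body (1 : Int) == some '.') then false
    else body.any (fun c => PySem.Chars.isdigit c)

lemma validNumA_eq_validE (cs : List Char) : validNumA cs = validE cs := by
  simp only [validNumA, validE, count_singleton, isIn_singleton, startswith_singleton,
    PySem.List.slice_from_one]

lemma A_minus (r : List Char) : validNumA ('-' :: r) = bodyOK r := by
  rw [validNumA_eq_validE]
  have hb : headBeq ('-' :: r) '-' = true := by simp [headBeq]
  have hbad : (!(jsonNumChars.contains '-')) = false := by decide
  have hc1 : List.count '-' ('-' :: r) = r.count '-' + 1 := by simp [List.count_cons]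
  have hc2 : List.count '.' ('-' :: r) = r.count '.' := by simp [List.count_cons]
  have hd1 : decide (1 < r.count '-' + 1) = decide (0 < r.count '-') := by
    simp only [decide_eq_decide]; omega
  simp only [validE, bodyOK, bodyFinal, hb, hbad, hc1, hc2, hd1, List.any_cons,
    Bool.false_or, Bool.not_true, Bool.and_false, Bool.or_false, List.tail_cons,
    if_true, reduceCtorEq, if_false, decide_eq_true_eq]

lemma A_nominus (c : Char) (r : List Char) (hc : c ≠ '-') :
    validNumA (c :: r) = bodyOK (c :: r) := by
  rw [validNumA_eq_validE]
  have hb : headBeq (c :: r) '-' = false := by simp [headBeq, hc]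
  have h2 : (c :: r).contains '-' = decide (0 < (c :: r).count '-') := by
    simp [List.contains_eq_mem, List.count_pos_iff]
  have h3 : (decide (1 < (c :: r).count '-') || decide (0 < (c :: r).count '-')) =
      decide (0 < (c :: r).count '-') := by
    simp only [← Bool.decide_or, decide_eq_decide]; omega
  simp only [validE, bodyOK, bodyFinal, hb, h2, Bool.not_false, Bool.and_true, h3,
    reduceCtorEq, if_false, if_true, decide_eq_true_eq, false_or]

-- the clean conjunction form of bodyOK
lemma dotdig_contains (c : Char) (h : (c == '.' || PySem.Chars.isdigit c) = true) :
    jsonNumChars.contains c = true := by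
  rcases Bool.or_eq_true_iff.mp h with h | h
  · rw [show c = '.' from by simpa using h]; decide
  · exact (contains_spec c).mpr (Or.inr (Or.inr ((dig_spec c).mp h)))

lemma bodyOK_expand (b : List Char) :
    bodyOK b = ((b.all fun c => c == '.' || PySem.Chars.isdigit c) &&
      decide (b.count '.' ≤ 1) && bodyFinal b) := by
  unfold bodyOK
  split_ifs with h1 h2 h3
  · cases hall : (b.all fun c => c == '.' || PySem.Chars.isdigit c) with
    | false => simp [hall]
    | true =>
      exfalso
      simp only [List.any_eq_true, Bool.not_eq_eq_eq_not, Bool.not_true] at h1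
      obtain ⟨x, hx, hxbad⟩ := h1
      rw [dotdig_contains x (List.all_eq_true.mp hall x hx)] at hxbad
      exact absurd hxbad (by decide)
  · cases hall : (b.all fun c => c == '.' || PySem.Chars.isdigit c) with
    | false => simp [hall]
    | true =>
      exfalso
      have hmem : '-' ∈ b := List.count_pos_iff.mp h2
      have h2' := List.all_eq_true.mp hall '-' hmem
      simp only [] at h2'
      exact absurd h2' (by decide)
  · have : decide (b.count '.' ≤ 1) = false := by simp; omega
    simp [this]
  · have hall : (b.all fun c => jsonNumChars.contains c) = true := by
      rw [List.all_eq_true]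
      intro x hx
      cases hcx : jsonNumChars.contains x with
      | true => rfl
      | false => exact absurd (List.any_eq_true.mpr ⟨x, hx, by rw [hcx]; rfl⟩) h1
    have hm0 : decide (b.count '-' = 0) = true := by simp; omega
    have hdd : (b.all fun c => c == '.' || PySem.Chars.isdigit c) = true := by
      rw [← jsonOK_expand, hall, hm0]; rfl
    have hd1 : decide (b.count '.' ≤ 1) = true := by simp; omega
    rw [hdd, hd1]
    rfl

-- the key lemma: the DFA from state M computes A's body verdict
lemma B_M (b : List Char) : numAccept (b.foldl numStep .M) = bodyOK b := by
  cases b with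
  | nil => rfl
  | cons c t =>
    rw [bodyOK_expand]
    by_cases hm : c = '-'
    · subst hm
      rw [List.foldl_cons, show numStep .M '-' = .X from by decide, run_X]
      have hdd : (('-' : Char) == '.' || PySem.Chars.isdigit '-') = false := by decide
      simp only [List.all_cons, hdd, Bool.false_and]
      rfl
    · by_cases hd : c = '.'
      · subst hd
        rw [List.foldl_cons, show numStep .M '.' = .D from by decide, run_D]
        cases t with
        | nil => decide
        | cons c1 t1 =>
          have hfin : bodyFinal ('.' :: c1 :: t1) = (c1 :: t1).any PySem.Chars.isdigit := by
            unfold bodyFinal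
            rw [if_neg (by simp)]
            have hg : (PySem.List.pyGet? ('.' :: c1 :: t1) (0 : Int) == some '0') = false := by
              rw [show (0 : Int) = ((0 : Nat) : Int) from rfl, PySem.List.pyGet?_natCast]
              rfl
            rw [hg, Bool.and_false, Bool.false_and, if_neg (by simp)]
            rw [List.any_cons, show PySem.Chars.isdigit '.' = false from by decide, Bool.false_or]
          simp only [hfin, List.all_cons,
            show (('.' : Char) == '.' || PySem.Chars.isdigit '.') = true from by decide,
            Bool.true_and,
            show List.count '.' ('.' :: c1 :: t1) = (c1 :: t1).count '.' + 1 from by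
              simp [List.count_cons],
            show decide ((c1 :: t1).count '.' + 1 ≤ 1) = decide ((c1 :: t1).count '.' = 0) from by
              simp only [decide_eq_decide]; omega,
            show decide ((c1 :: t1) ≠ []) = true from by simp,
            ← List.all_cons, ← all_dig_expand]
          rw [show (('.' :: c1 :: t1).all fun c => c == '.' || PySem.Chars.isdigit c) =
              ((c1 :: t1).all fun c => c == '.' || PySem.Chars.isdigit c) from by simp,
            ← all_dig_expand]
          cases hall : (c1 :: t1).all PySem.Chars.isdigit with
          | false => rw [Bool.false_and]
          | true =>
            have hany : (c1 :: t1).any PySem.Chars.isdigit = true :=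
              List.any_eq_true.mpr ⟨c1, by simp, List.all_eq_true.mp hall c1 (by simp)⟩
            rw [hany]
            rfl
      · by_cases h0 : c = '0'
        · subst h0
          rw [List.foldl_cons, show numStep .M '0' = .Z from by decide, run_Z]
          cases t with
          | nil => decide
          | cons c1 t1 =>
            by_cases hc1 : c1 = '.'
            · subst hc1
              have hfin : bodyFinal ('0' :: '.' :: t1) = true := by
                unfold bodyFinal
                rw [if_neg (by simp)]
                have hg1 : (PySem.List.pyGet? ('0' :: '.' :: t1) (1 : Int) == some '.') = true := by
                  rw [show (1 : Int) = ((1 : Nat) : Int) from rfl, PySem.List.pyGet?_natCast]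
                  rfl
                rw [hg1, Bool.not_true, Bool.and_false, if_neg (by simp)]
                rw [List.any_cons, show PySem.Chars.isdigit '0' = true from by decide, Bool.true_or]
              simp only [hfin, List.all_cons,
                show (('0' : Char) == '.' || PySem.Chars.isdigit '0') = true from by decide,
                show (('.' : Char) == '.' || PySem.Chars.isdigit '.') = true from by decide,
                Bool.true_and, Bool.and_true,
                show List.count '.' ('0' :: '.' :: t1) = t1.count '.' + 1 from by
                  simp [List.count_cons],
                show decide (t1.count '.' + 1 ≤ 1) = decide (t1.count '.' = 0) from by
                  simp only [decide_eq_decide]; omega,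
                ← all_dig_expand]
              rw [show (('.' : Char) == '.') = true from rfl, Bool.true_and]
            · have hfin : bodyFinal ('0' :: c1 :: t1) = false := by
                unfold bodyFinal
                rw [if_neg (by simp)]
                have hg0 : (PySem.List.pyGet? ('0' :: c1 :: t1) (0 : Int) == some '0') = true := by
                  rw [show (0 : Int) = ((0 : Nat) : Int) from rfl, PySem.List.pyGet?_natCast]
                  rfl
                have hg1 : (PySem.List.pyGet? ('0' :: c1 :: t1) (1 : Int) == some '.') = false := by
                  rw [show (1 : Int) = ((1 : Nat) : Int) from rfl, PySem.List.pyGet?_natCast]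
                  simp [List.getElem?_cons_succ, List.getElem?_cons_zero, hc1]
                rw [hg0, hg1, Bool.not_false, Bool.and_true]
                rw [if_pos (by simp)]
              rw [hfin]
              have hb1 : (c1 == '.') = false := by simp [hc1]
              simp [hb1]
        · cases hdig : PySem.Chars.isdigit c with
          | true =>
            rw [List.foldl_cons, show numStep .M c = .I from by simp [numStep, h0, hdig],
              run_I, intRest_expand]
            have hfin : bodyFinal (c :: t) = true := by
              unfold bodyFinal
              rw [if_neg (by simp [hd])]
              have hg0 : (PySem.List.pyGet? (c :: t) (0 : Int) == some '0') = false := by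
                rw [show (0 : Int) = ((0 : Nat) : Int) from rfl, PySem.List.pyGet?_natCast]
                simp [h0]
              rw [hg0, Bool.and_false, Bool.false_and, if_neg (by simp)]
              rw [List.any_cons, hdig, Bool.true_or]
            simp only [hfin, List.all_cons,
              show (c == '.' || PySem.Chars.isdigit c) = true from by simp [hdig],
              Bool.true_and, Bool.and_true,
              show List.count '.' (c :: t) = t.count '.' from by simp [List.count_cons, hd]]
          | false =>
            have hdd : (c == '.' || PySem.Chars.isdigit c) = false := by simp [hd, hdig]
            rw [List.foldl_cons,
              show numStep .M c = .X from by simp [numStep, h0, hdig, hd], run_X]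
            simp only [List.all_cons, hdd, Bool.false_and]
            rfl

theorem numMain (cs : List Char) : validNumA cs = numAccept (cs.foldl numStep .S) := by
  cases cs with
  | nil => rfl
  | cons c r =>
    by_cases hc : c = '-'
    · subst hc
      have : numStep .S '-' = .M := by decide
      rw [List.foldl_cons, this, B_M, A_minus]
    · have : numStep .S c = numStep .M c := by simp [numStep, hc]
      rw [List.foldl_cons, this, ← List.foldl_cons, B_M, A_nominus c r hc]

-- ===== VERDICT (by name: the statement is the Claim_ definition above) =====
theorem valid_number_prefix_py_spec : Claim_equal_valid_number_prefix_py := by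
  intro text _
  unfold Spec_valid_number_prefix_py valid_number_prefix_py valid_number_prefix_py_alt
  exact numMain text.toList
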